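-- pv_equiv track=rewrite | github.com/cyyeh/computational-biology | rosalind/algorithmic_heights/double_degree_array.py | double_degree_array
-- ===== SOURCE A (Python) =====
-- from typing import List
--
-- def double_degree_array(nodes: int, edge_list_data: List[str]) -> List[int]:
--     adjacency_list = [[] for _ in range(nodes)]
--     for line in edge_list_data:
--         from_node, to_node = map(int, line.split(' '))
--         adjacency_list[from_node - 1].append(to_node - 1)
--         adjacency_list[to_node - 1].append(from_node - 1)
--
--     return [
--         sum([len(adjacency_list[neighbor]) for neighbor in neighbors])
--         for neighbors in adjacency_list
--     ]
-- ===== SOURCE B (Python) =====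
-- def double_degree_array(nodes, edge_list_data):
--     # Two flat passes over parsed edges instead of building an adjacency list.
--     degree = [0] * nodes
--     edges = []
--     for line in edge_list_data:
--         from_node, to_node = map(int, line.split(' '))
--         degree[from_node - 1] += 1
--         degree[to_node - 1] += 1
--         edges.append((from_node - 1, to_node - 1))
--     result = [0] * nodes
--     for u, v in edges:
--         result[u] += degree[v]
--         result[v] += degree[u]
--     return result
-- ===== Notes on version B (the rewrite author's own statement) =====
-- stated objective: alternative
-- what changed: Replaces the adjacency-list build and per-node neighbor traversal with two flat passes: a degree array incremented per edge endpoint, then an edge-wise accumulation result[u] += degree[v], result[v] += degree[u].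
import Mathlib
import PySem

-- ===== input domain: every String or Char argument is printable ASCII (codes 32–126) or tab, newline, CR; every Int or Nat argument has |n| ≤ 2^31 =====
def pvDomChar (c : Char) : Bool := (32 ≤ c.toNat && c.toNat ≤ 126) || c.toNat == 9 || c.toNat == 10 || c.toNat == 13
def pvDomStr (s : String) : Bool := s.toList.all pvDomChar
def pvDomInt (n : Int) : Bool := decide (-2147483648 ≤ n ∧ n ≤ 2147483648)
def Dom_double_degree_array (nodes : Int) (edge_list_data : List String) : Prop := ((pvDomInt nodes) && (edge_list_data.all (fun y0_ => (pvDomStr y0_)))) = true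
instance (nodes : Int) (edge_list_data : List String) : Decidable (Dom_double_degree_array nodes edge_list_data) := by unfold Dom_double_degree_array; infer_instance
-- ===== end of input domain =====

-- B replaces A's adjacency-list build and per-node neighbor traversal by two flat passes
-- (a degree array incremented per edge endpoint, then edge-wise accumulation); same asymptotic cost.

-- shared parse of one edge line: 'from_node, to_node = map(int, line.split(' '))'
-- (returns none exactly where Python raises ValueError: not exactly two ' '-separated int-like parts)
def pvParseEdge? (line : String) : Option (Int × Int) :=
  match PySem.Str.split? line " " with
  | some [a, b] =>
    match PySem.Int.ofStr? a, PySem.Int.ofStr? b with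
    | some u, some v => some (u, v)
    | _, _ => none
  | _ => none

-- ===== PORT A =====
-- adjacency_list[i].append(x)  (Python indexing: negative i wraps; out of range is excluded by Pre_)
def pvAppendAt (adj : List (List Int)) (i x : Int) : List (List Int) :=
  PySem.List.pySetD adj i (PySem.List.pyGetD adj i [] ++ [x])

-- loop body of A on a parsed pair: append to_node-1 to row from_node-1, then the converse
def pvStepA (adj : List (List Int)) (p : Int × Int) : List (List Int) :=
  pvAppendAt (pvAppendAt adj p.1 p.2) p.2 p.1

def double_degree_array (nodes : Int) (edge_list_data : List String) : List Int :=
  let adj0 : List (List Int) := (List.range nodes.toNat).map (fun _ => [])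
  let adj := edge_list_data.foldl (fun adj line =>
    match pvParseEdge? line with
    | some (u, v) => pvStepA adj (u - 1, v - 1)
    | none => adj) adj0   -- unreachable under Pre_: Python raises ValueError here
  adj.map (fun neighbors =>
    (neighbors.map (fun nb => ((PySem.List.pyGetD adj nb []).length : Int))).sum)

-- ===== PORT B =====
-- xs[i] += v  (Python indexing, as above)
def pvAddAt (xs : List Int) (i : Int) (v : Int) : List Int :=
  PySem.List.pySetD xs i (PySem.List.pyGetD xs i 0 + v)

-- first pass body: degree[u] += 1; degree[v] += 1
def pvStepDeg (deg : List Int) (p : Int × Int) : List Int :=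
  pvAddAt (pvAddAt deg p.1 1) p.2 1

-- second pass body: result[u] += degree[v]; result[v] += degree[u]
def pvStepRes (degree : List Int) (res : List Int) (p : Int × Int) : List Int :=
  pvAddAt (pvAddAt res p.1 (PySem.List.pyGetD degree p.2 0)) p.2 (PySem.List.pyGetD degree p.1 0)

def double_degree_array_alt (nodes : Int) (edge_list_data : List String) : List Int :=
  let st := edge_list_data.foldl (fun (st : List Int × List (Int × Int)) line =>
    match pvParseEdge? line with
    | some (u, v) => (pvStepDeg st.1 (u - 1, v - 1), st.2 ++ [(u - 1, v - 1)])
    | none => st)   -- unreachable under Pre_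
    (List.replicate nodes.toNat 0, [])
  st.2.foldl (pvStepRes st.1) (List.replicate nodes.toNat 0)

-- ===== PRECONDITION & SPEC =====
-- Pre_ = exactly the inputs where Python A returns: every line splits on ' ' into two int-like
-- parts (else ValueError) and both node numbers index the nodes-long list without IndexError
-- (Python's negative indices down to -nodes wrap and are INSIDE Pre_).
def Pre_double_degree_array (nodes : Int) (edge_list_data : List String) : Prop :=
  edge_list_data.all (fun line =>
    match pvParseEdge? line with
    | some (u, v) => decide (-(nodes.toNat : Int) ≤ u - 1 ∧ u - 1 < (nodes.toNat : Int) ∧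
                             -(nodes.toNat : Int) ≤ v - 1 ∧ v - 1 < (nodes.toNat : Int))
    | none => false) = true
instance (nodes : Int) (edge_list_data : List String) : Decidable (Pre_double_degree_array nodes edge_list_data) := by unfold Pre_double_degree_array; infer_instance

def pvWitness_double_degree_array : Int × List String := (3, ["1 2", "2 3"])

def Spec_double_degree_array (nodes : Int) (edge_list_data : List String) (out : List Int) : Prop := out = double_degree_array_alt nodes edge_list_data
instance (nodes : Int) (edge_list_data : List String) (out : List Int) : Decidable (Spec_double_degree_array nodes edge_list_data out) := by unfold Spec_double_degree_array; infer_instance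

-- ===== CLAIM (what is proved, stated in full; the proofs are below) =====
def Claim_equal_double_degree_array : Prop := ∀ (nodes : Int) (edge_list_data : List String), Dom_double_degree_array nodes edge_list_data → Pre_double_degree_array nodes edge_list_data → Spec_double_degree_array nodes edge_list_data (double_degree_array nodes edge_list_data)

-- ===== LEMMAS AND PROOFS =====

-- Python index wraparound on a list of length n
def pvWrap (n : Nat) (i : Int) : Nat := (if i < 0 then i + n else i).toNat

theorem pvWrap_lt (n : Nat) (i : Int) (h1 : -(n : Int) ≤ i) (h2 : i < n) : pvWrap n i < n := by
  unfold pvWrap; split <;> omega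

theorem pyGetD_wrap {α : Type} (xs : List α) (i : Int) (d : α)
    (h1 : -(xs.length : Int) ≤ i) (h2 : i < xs.length) :
    PySem.List.pyGetD xs i d = xs.getD (pvWrap xs.length i) d := by
  by_cases h : 0 ≤ i
  · rw [PySem.List.pyGetD_eq_getElem xs d h h2, pvWrap, if_neg (by omega)]
    rw [List.getD_eq_getElem xs d (by omega)]
  · have h : i < 0 := by omega
    have hk : i = -(((-i).toNat : Nat) : Int) := by omega
    rw [hk, PySem.List.pyGetD_neg_natCast xs _ d (by omega) (by omega)]
    rw [pvWrap, if_pos (by omega), List.getD_eq_getElem xs d (by omega)]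
    congr 1
    omega

theorem pySetD_wrap {α : Type} (xs : List α) (i : Int) (v : α)
    (h1 : -(xs.length : Int) ≤ i) (h2 : i < xs.length) :
    PySem.List.pySetD xs i v = xs.set (pvWrap xs.length i) v := by
  unfold PySem.List.pySetD PySem.List.pySet? PySem.List.pyIdx?
  by_cases h : 0 ≤ i
  · rw [if_pos h, if_pos h2]
    simp [pvWrap, if_neg (by omega : ¬ i < 0)]
  · rw [if_neg h, if_pos h1]
    simp only [Option.map_some, Option.getD_some, pvWrap, if_pos (by omega : i < 0)]
    congr 1
    omega

theorem getD_set {α : Type} (xs : List α) (i k : Nat) (v d : α) (hk : k < xs.length) :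
    (xs.set i v).getD k d = if i = k then v else xs.getD k d := by
  rw [List.getD_eq_getElem _ d (by simpa using hk), List.getD_eq_getElem _ d hk, List.getElem_set]

theorem length_addAt (xs : List Int) (i v : Int)
    (h1 : -(xs.length : Int) ≤ i) (h2 : i < xs.length) : (pvAddAt xs i v).length = xs.length := by
  unfold pvAddAt; rw [pySetD_wrap _ _ _ h1 h2]; simp

theorem getD_addAt (xs : List Int) (i v : Int) (k : Nat)
    (h1 : -(xs.length : Int) ≤ i) (h2 : i < xs.length) (hk : k < xs.length) :
    (pvAddAt xs i v).getD k 0 = xs.getD k 0 + (if pvWrap xs.length i = k then v else 0) := by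
  unfold pvAddAt
  rw [pySetD_wrap _ _ _ h1 h2, pyGetD_wrap _ _ _ h1 h2, getD_set _ _ _ _ _ hk]
  split <;> simp_all

theorem length_appendAt (xs : List (List Int)) (i x : Int)
    (h1 : -(xs.length : Int) ≤ i) (h2 : i < xs.length) : (pvAppendAt xs i x).length = xs.length := by
  unfold pvAppendAt; rw [pySetD_wrap _ _ _ h1 h2]; simp

theorem getD_appendAt (xs : List (List Int)) (i x : Int) (k : Nat)
    (h1 : -(xs.length : Int) ≤ i) (h2 : i < xs.length) (hk : k < xs.length) :
    (pvAppendAt xs i x).getD k [] = xs.getD k [] ++ (if pvWrap xs.length i = k then [x] else []) := by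
  unfold pvAppendAt
  rw [pySetD_wrap _ _ _ h1 h2, pyGetD_wrap _ _ _ h1 h2, getD_set _ _ _ _ _ hk]
  split <;> simp_all

-- the parsed, 0-based pair list both ports fold over
def pvPairs (ls : List String) : List (Int × Int) :=
  ls.filterMap (fun line => (pvParseEdge? line).map (fun uv => (uv.1 - 1, uv.2 - 1)))

def pvGood (n : Nat) (P : List (Int × Int)) : Prop :=
  ∀ p ∈ P, -(n : Int) ≤ p.1 ∧ p.1 < n ∧ -(n : Int) ≤ p.2 ∧ p.2 < n

def pvFlat (n : Nat) (k : Nat) (P : List (Int × Int)) : List Int :=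
  P.flatMap (fun p => (if pvWrap n p.1 = k then [p.2] else []) ++ (if pvWrap n p.2 = k then [p.1] else []))

def pvDeg (n : Nat) (P : List (Int × Int)) (j : Nat) : Nat := (pvFlat n j P).length

theorem foldl_parse {σ : Type} (g : σ → Int × Int → σ) :
    ∀ (ls : List String) (s : σ),
    ls.foldl (fun s line =>
      match pvParseEdge? line with
      | some (u, v) => g s (u - 1, v - 1)
      | none => s) s
    = (pvPairs ls).foldl g s := by
  intro ls
  induction ls with
  | nil => intro s; rfl
  | cons l ls ih =>
    intro s
    simp only [List.foldl_cons, pvPairs, List.filterMap_cons]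
    cases h : pvParseEdge? l with
    | none => simpa [h] using ih s
    | some uv =>
      cases uv with
      | mk u v => simpa [h] using ih (g s (u - 1, v - 1))

theorem pvGood_of_pre (nodes : Int) (ls : List String)
    (hpre : Pre_double_degree_array nodes ls) : pvGood nodes.toNat (pvPairs ls) := by
  intro p hp
  simp only [pvPairs, List.mem_filterMap, Option.map_eq_some_iff] at hp
  obtain ⟨line, hline, uv, huv, rfl⟩ := hp
  unfold Pre_double_degree_array at hpre
  rw [List.all_eq_true] at hpre
  have := hpre line hline
  rw [huv] at this
  simp only [decide_eq_true_eq] at this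
  exact ⟨this.1, this.2.1, this.2.2.1, this.2.2.2⟩

-- ----- A side -----

theorem stepA_len (n : Nat) (adj : List (List Int)) (p : Int × Int)
    (hlen : adj.length = n)
    (h1 : -(n : Int) ≤ p.1) (h2 : p.1 < n) (h3 : -(n : Int) ≤ p.2) (h4 : p.2 < n) :
    (pvStepA adj p).length = n := by
  unfold pvStepA
  have l1 : (pvAppendAt adj p.1 p.2).length = n := by
    rw [length_appendAt _ _ _ (by omega) (by omega)]; exact hlen
  rw [length_appendAt _ _ _ (by rw [l1]; exact h3) (by rw [l1]; exact h4)]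
  exact l1

theorem stepA_getD (n : Nat) (adj : List (List Int)) (p : Int × Int) (k : Nat)
    (hlen : adj.length = n) (hk : k < n)
    (h1 : -(n : Int) ≤ p.1) (h2 : p.1 < n) (h3 : -(n : Int) ≤ p.2) (h4 : p.2 < n) :
    (pvStepA adj p).getD k [] = adj.getD k [] ++
      ((if pvWrap n p.1 = k then [p.2] else []) ++ (if pvWrap n p.2 = k then [p.1] else [])) := by
  unfold pvStepA
  have l1 : (pvAppendAt adj p.1 p.2).length = n := by
    rw [length_appendAt _ _ _ (by omega) (by omega)]; exact hlen
  rw [getD_appendAt _ _ _ _ (by rw [l1]; exact h3) (by rw [l1]; exact h4) (by rw [l1]; exact hk),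
      getD_appendAt _ _ _ _ (by omega) (by omega) (by omega), l1, hlen, List.append_assoc]

theorem adjInv (n : Nat) (P : List (Int × Int)) : ∀ (adj : List (List Int)) (k : Nat),
    pvGood n P → adj.length = n → k < n →
    (P.foldl pvStepA adj).getD k [] = adj.getD k [] ++ pvFlat n k P ∧
    (P.foldl pvStepA adj).length = n := by
  induction P with
  | nil => intro adj k _ hlen _; simp [pvFlat, hlen]
  | cons p P ih =>
    intro adj k hg hlen hk
    obtain ⟨h1, h2, h3, h4⟩ := hg p (List.mem_cons_self ..)
    have hlen' := stepA_len n adj p hlen h1 h2 h3 h4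
    obtain ⟨ihv, ihl⟩ := ih (pvStepA adj p) k (fun q hq => hg q (List.mem_cons_of_mem _ hq)) hlen' hk
    refine ⟨?_, by rw [List.foldl_cons]; exact ihl⟩
    rw [List.foldl_cons, ihv, stepA_getD n adj p k hlen hk h1 h2 h3 h4]
    simp [pvFlat]

theorem mem_flat (n k : Nat) (P : List (Int × Int)) (nb : Int) (h : nb ∈ pvFlat n k P) :
    ∃ p ∈ P, nb = p.1 ∨ nb = p.2 := by
  simp only [pvFlat, List.mem_flatMap] at h
  obtain ⟨p, hp, hmem⟩ := h
  refine ⟨p, hp, ?_⟩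
  rw [List.mem_append] at hmem
  rcases hmem with hm | hm
  · split at hm
    · simp at hm; right; exact hm
    · simp at hm
  · split at hm
    · simp at hm; left; exact hm
    · simp at hm

theorem sum_flat (n k : Nat) (f : Int → Int) (P : List (Int × Int)) :
    ((pvFlat n k P).map f).sum =
    (P.map (fun p => (if pvWrap n p.1 = k then f p.2 else 0) + (if pvWrap n p.2 = k then f p.1 else 0))).sum := by
  induction P with
  | nil => rfl
  | cons p P ih =>
    simp only [pvFlat, List.flatMap_cons, List.map_append, List.sum_append, List.map_cons, List.sum_cons]
    rw [← pvFlat, ih]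
    split_ifs <;> simp

-- ----- B side -----

theorem foldB_split (P : List (Int × Int)) : ∀ (d : List Int) (es : List (Int × Int)),
    P.foldl (fun (st : List Int × List (Int × Int)) p => (pvStepDeg st.1 p, st.2 ++ [p])) (d, es)
    = (P.foldl pvStepDeg d, es ++ P) := by
  induction P with
  | nil => intro d es; simp
  | cons p P ih => intro d es; simp [ih]

theorem stepDeg_len (n : Nat) (deg : List Int) (p : Int × Int)
    (hlen : deg.length = n)
    (h1 : -(n : Int) ≤ p.1) (h2 : p.1 < n) (h3 : -(n : Int) ≤ p.2) (h4 : p.2 < n) :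
    (pvStepDeg deg p).length = n := by
  unfold pvStepDeg
  have l1 : (pvAddAt deg p.1 1).length = n := by
    rw [length_addAt _ _ _ (by omega) (by omega)]; exact hlen
  rw [length_addAt _ _ _ (by rw [l1]; exact h3) (by rw [l1]; exact h4)]
  exact l1

theorem stepDeg_getD (n : Nat) (deg : List Int) (p : Int × Int) (k : Nat)
    (hlen : deg.length = n) (hk : k < n)
    (h1 : -(n : Int) ≤ p.1) (h2 : p.1 < n) (h3 : -(n : Int) ≤ p.2) (h4 : p.2 < n) :
    (pvStepDeg deg p).getD k 0 = deg.getD k 0 +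
      ((if pvWrap n p.1 = k then (1 : Int) else 0) + (if pvWrap n p.2 = k then (1 : Int) else 0)) := by
  unfold pvStepDeg
  have l1 : (pvAddAt deg p.1 1).length = n := by
    rw [length_addAt _ _ _ (by omega) (by omega)]; exact hlen
  rw [getD_addAt _ _ _ _ (by rw [l1]; exact h3) (by rw [l1]; exact h4) (by rw [l1]; exact hk),
      getD_addAt _ _ _ _ (by omega) (by omega) (by omega), l1, hlen, add_assoc]

theorem degInv (n : Nat) (P : List (Int × Int)) : ∀ (deg : List Int) (k : Nat),
    pvGood n P → deg.length = n → k < n →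
    (P.foldl pvStepDeg deg).getD k 0 = deg.getD k 0 +
      (P.map (fun p => (if pvWrap n p.1 = k then (1 : Int) else 0) + (if pvWrap n p.2 = k then (1 : Int) else 0))).sum ∧
    (P.foldl pvStepDeg deg).length = n := by
  induction P with
  | nil => intro deg k _ hlen _; simp [hlen]
  | cons p P ih =>
    intro deg k hg hlen hk
    obtain ⟨h1, h2, h3, h4⟩ := hg p (List.mem_cons_self ..)
    have hlen' := stepDeg_len n deg p hlen h1 h2 h3 h4
    obtain ⟨ihv, ihl⟩ := ih (pvStepDeg deg p) k (fun q hq => hg q (List.mem_cons_of_mem _ hq)) hlen' hk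
    refine ⟨?_, by rw [List.foldl_cons]; exact ihl⟩
    rw [List.foldl_cons, ihv, stepDeg_getD n deg p k hlen hk h1 h2 h3 h4]
    simp only [List.map_cons, List.sum_cons]
    ring

theorem stepRes_len (n : Nat) (D res : List Int) (p : Int × Int)
    (hlen : res.length = n)
    (h1 : -(n : Int) ≤ p.1) (h2 : p.1 < n) (h3 : -(n : Int) ≤ p.2) (h4 : p.2 < n) :
    (pvStepRes D res p).length = n := by
  unfold pvStepRes
  have l1 : (pvAddAt res p.1 (PySem.List.pyGetD D p.2 0)).length = n := by
    rw [length_addAt _ _ _ (by omega) (by omega)]; exact hlen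
  rw [length_addAt _ _ _ (by rw [l1]; exact h3) (by rw [l1]; exact h4)]
  exact l1

theorem stepRes_getD (n : Nat) (D res : List Int) (p : Int × Int) (k : Nat)
    (hlen : res.length = n) (hD : D.length = n) (hk : k < n)
    (h1 : -(n : Int) ≤ p.1) (h2 : p.1 < n) (h3 : -(n : Int) ≤ p.2) (h4 : p.2 < n) :
    (pvStepRes D res p).getD k 0 = res.getD k 0 +
      ((if pvWrap n p.1 = k then D.getD (pvWrap n p.2) 0 else 0) +
       (if pvWrap n p.2 = k then D.getD (pvWrap n p.1) 0 else 0)) := by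
  unfold pvStepRes
  have hDv : PySem.List.pyGetD D p.2 0 = D.getD (pvWrap n p.2) 0 := by
    rw [pyGetD_wrap _ _ _ (by omega) (by omega), hD]
  have hDu : PySem.List.pyGetD D p.1 0 = D.getD (pvWrap n p.1) 0 := by
    rw [pyGetD_wrap _ _ _ (by omega) (by omega), hD]
  have l1 : (pvAddAt res p.1 (PySem.List.pyGetD D p.2 0)).length = n := by
    rw [length_addAt _ _ _ (by omega) (by omega)]; exact hlen
  rw [getD_addAt _ _ _ _ (by rw [l1]; exact h3) (by rw [l1]; exact h4) (by rw [l1]; exact hk),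
      getD_addAt _ _ _ _ (by omega) (by omega) (by omega), l1, hlen, hDv, hDu, add_assoc]

theorem resInv (n : Nat) (D : List Int) (P : List (Int × Int)) : ∀ (res : List Int) (k : Nat),
    pvGood n P → res.length = n → D.length = n → k < n →
    (P.foldl (pvStepRes D) res).getD k 0 = res.getD k 0 +
      (P.map (fun p => (if pvWrap n p.1 = k then D.getD (pvWrap n p.2) 0 else 0) +
                       (if pvWrap n p.2 = k then D.getD (pvWrap n p.1) 0 else 0))).sum ∧
    (P.foldl (pvStepRes D) res).length = n := by
  induction P with
  | nil => intro res k _ hlen _ _; simp [hlen]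
  | cons p P ih =>
    intro res k hg hlen hD hk
    obtain ⟨h1, h2, h3, h4⟩ := hg p (List.mem_cons_self ..)
    have hlen' := stepRes_len n D res p hlen h1 h2 h3 h4
    obtain ⟨ihv, ihl⟩ := ih (pvStepRes D res p) k (fun q hq => hg q (List.mem_cons_of_mem _ hq)) hlen' hD hk
    refine ⟨?_, by rw [List.foldl_cons]; exact ihl⟩
    rw [List.foldl_cons, ihv, stepRes_getD n D res p k hlen hD hk h1 h2 h3 h4]
    simp only [List.map_cons, List.sum_cons]
    ring

theorem cnt_eq_deg (n j : Nat) (P : List (Int × Int)) :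
    (P.map (fun p => (if pvWrap n p.1 = j then (1 : Int) else 0) + (if pvWrap n p.2 = j then (1 : Int) else 0))).sum
    = (pvDeg n P j : Int) := by
  induction P with
  | nil => rfl
  | cons p P ih =>
    simp only [List.map_cons, List.sum_cons, ih, pvDeg, pvFlat, List.flatMap_cons, List.length_append]
    rw [← pvFlat]
    split_ifs <;> simp

-- ----- main -----

theorem double_degree_array_eq (nodes : Int) (ls : List String)
    (hpre : Pre_double_degree_array nodes ls) :
    double_degree_array nodes ls = double_degree_array_alt nodes ls := by
  have hgood : pvGood nodes.toNat (pvPairs ls) := pvGood_of_pre nodes ls hpre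
  set n := nodes.toNat with hn
  set P := pvPairs ls with hP
  unfold double_degree_array double_degree_array_alt
  dsimp only
  rw [foldl_parse pvStepA ls _,
      foldl_parse (fun (st : List Int × List (Int × Int)) p => (pvStepDeg st.1 p, st.2 ++ [p])) ls
        (List.replicate nodes.toNat 0, []), foldB_split]
  simp only [← hn, ← hP, List.nil_append]
  -- facts about the three accumulators
  have hadj0len : ((List.range n).map (fun _ => ([] : List Int))).length = n := by simp
  have hadj0getD : ∀ k < n, ((List.range n).map (fun _ => ([] : List Int))).getD k [] = [] := by
    intro k hk
    rw [List.getD_eq_getElem _ _ (by simpa using hk)]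
    simp
  set adjF := P.foldl pvStepA ((List.range n).map (fun _ => [])) with hadjF
  set degF := P.foldl pvStepDeg (List.replicate n 0) with hdegF
  set resF := P.foldl (pvStepRes degF) (List.replicate n 0) with hresF
  have hadjlen : adjF.length = n := by
    rcases hne : P with _ | ⟨p, P'⟩
    · simp [hadjF, hne]
    · exact (adjInv n P _ 0 hgood hadj0len (by
        have := hgood p (by rw [hne]; exact List.mem_cons_self ..); omega)).2
  have hadjgetD : ∀ k, k < n → adjF.getD k [] = pvFlat n k P := by
    intro k hk
    rw [hadjF, (adjInv n P _ k hgood hadj0len hk).1, hadj0getD k hk, List.nil_append]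
  have hdeglen : degF.length = n := by
    rcases hne : P with _ | ⟨p, P'⟩
    · simp [hdegF, hne]
    · exact (degInv n P _ 0 hgood (by simp) (by
        have := hgood p (by rw [hne]; exact List.mem_cons_self ..); omega)).2
  have hdeggetD : ∀ j, j < n → degF.getD j 0 = (pvDeg n P j : Int) := by
    intro j hj
    rw [hdegF, (degInv n P _ j hgood (by simp) hj).1, cnt_eq_deg n j P,
        List.getD_eq_getElem _ _ (by simpa using hj)]
    simp
  have hreslen : resF.length = n := by
    rcases hne : P with _ | ⟨p, P'⟩
    · simp [hresF, hne]
    · exact (resInv n degF P _ 0 hgood (by simp) hdeglen (by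
        have := hgood p (by rw [hne]; exact List.mem_cons_self ..); omega)).2
  -- elementwise comparison
  apply List.ext_getElem
  · simp [hadjlen, hreslen]
  intro k hk1 hk2
  have hk : k < n := by simpa [hadjlen] using hk1
  rw [List.getElem_map]
  have hAk : adjF[k] = pvFlat n k P := by
    rw [← hadjgetD k hk, List.getD_eq_getElem _ _ (by omega)]
  have hBk : resF[k] = (P.map (fun p => (if pvWrap n p.1 = k then degF.getD (pvWrap n p.2) 0 else 0) +
      (if pvWrap n p.2 = k then degF.getD (pvWrap n p.1) 0 else 0))).sum := by
    rw [← List.getD_eq_getElem resF 0 hk2, hresF,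
        (resInv n degF P _ k hgood (by simp) hdeglen hk).1,
        List.getD_eq_getElem _ _ (by simpa using hk)]
    simp
  rw [hAk, hBk]
  -- rewrite A's per-neighbor lookups into pvDeg, then both sums termwise
  have hmapA : (pvFlat n k P).map (fun nb => ((PySem.List.pyGetD adjF nb []).length : Int))
      = (pvFlat n k P).map (fun nb => (pvDeg n P (pvWrap n nb) : Int)) := by
    apply List.map_congr_left
    intro nb hnb
    obtain ⟨p, hp, hor⟩ := mem_flat n k P nb hnb
    obtain ⟨g1, g2, g3, g4⟩ := hgood p hp
    have hr1 : -(adjF.length : Int) ≤ nb := by rw [hadjlen]; rcases hor with rfl | rfl <;> omega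
    have hr2 : nb < (adjF.length : Int) := by rw [hadjlen]; rcases hor with rfl | rfl <;> omega
    rw [pyGetD_wrap _ _ _ hr1 hr2, hadjlen,
        hadjgetD (pvWrap n nb) (by rcases hor with rfl | rfl <;> exact pvWrap_lt n _ (by omega) (by omega))]
    rfl
  rw [hmapA, sum_flat n k (fun nb => (pvDeg n P (pvWrap n nb) : Int)) P]
  apply congrArg
  apply List.map_congr_left
  intro p hp
  obtain ⟨g1, g2, g3, g4⟩ := hgood p hp
  rw [hdeggetD (pvWrap n p.2) (pvWrap_lt n _ g3 g4), hdeggetD (pvWrap n p.1) (pvWrap_lt n _ g1 g2)]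

-- ===== VERDICT (by name: the statement is the Claim_ definition above) =====
theorem double_degree_array_spec : Claim_equal_double_degree_array := by
  intro nodes ls _ hpre
  unfold Spec_double_degree_array
  exact double_degree_array_eq nodes ls hpre
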